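-- pv_equiv track=rewrite | github.com/arterialist/shnaker | tools.py | validate_pattern
-- ===== SOURCE A (Python) =====
-- def validate_pattern(pattern=''):
--     if len(pattern) is 0:
--         return False
--
--     necessarily_symbols = ['.', '/', '{', '}', '(', ')']
--
--     for symbol in necessarily_symbols:
--         if symbol not in pattern:
--             return False
--
--     if pattern.index('/') > pattern.index('.') or \
--                     pattern.find('(') > pattern.find('{') or \
--                     pattern.find('.') > pattern.find('(') or \
--                     pattern.rfind(')') != len(pattern) - 1 or \
--                     pattern.rfind('}') != len(pattern) - 2:
--         return False
--
--     if '|' in pattern and pattern.rfind('|') > pattern.rfind('}') and pattern.find('|') < pattern.find('{'):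
--         return False
--
--     if '[' in pattern and pattern.rfind(']') > len(pattern) - 3:
--         return False
--
--     return True
-- ===== SOURCE B (Python) =====
-- def validate_pattern(pattern=''):
--     # recognizer: the two required trailing characters, then a one-pass state
--     # machine that consumes the expected first-occurrence order '/', '.', '(', '{'
--     if not pattern.endswith('})'):
--         return False
--     expected = ['/', '.', '(', '{']
--     for ch in pattern:
--         if expected and ch == expected[0]:
--             expected.pop(0)
--         elif ch in expected:
--             return False
--     return not expected
-- ===== Notes on version B (the rewrite author's own statement) =====
-- stated objective: simpler
-- what changed: B is a recognizer: it checks the mandatory closing-brace-then-parenthesis suffix with endswith and then makes one pass over the string with a shrinking list of the four symbols whose first occurrences must appear in the order slash, dot, open-paren, open-brace, consuming the head on first sight and failing if a still-expected symbol shows up out of turn; A's six membership scans, five index/find/rfind comparison scans and its two logically redundant guard branches disappear.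
import Mathlib
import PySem

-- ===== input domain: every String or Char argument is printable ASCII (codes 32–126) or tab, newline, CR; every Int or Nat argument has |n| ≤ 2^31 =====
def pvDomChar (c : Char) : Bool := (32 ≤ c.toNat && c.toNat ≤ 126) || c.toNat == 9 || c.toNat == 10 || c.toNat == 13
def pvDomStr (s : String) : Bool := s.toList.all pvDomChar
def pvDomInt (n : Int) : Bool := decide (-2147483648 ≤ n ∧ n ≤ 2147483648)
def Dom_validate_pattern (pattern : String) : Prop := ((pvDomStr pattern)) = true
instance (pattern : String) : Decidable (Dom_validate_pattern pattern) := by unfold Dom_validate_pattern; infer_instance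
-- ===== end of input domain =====

-- B replaces A's dozen find/rfind/index scans and redundant guard branches by a suffix
-- check plus a one-pass state machine consuming the expected first-occurrence order (simpler).

-- ===== PORT A =====
-- 'pattern.index(c)' is ported as Str.find: exact here because the presence loop above
-- the comparison has already established that the character occurs in the pattern.
def validate_pattern (pattern : String) : Bool :=
  if PySem.Str.len pattern = 0 then false
  else
    let necessarily_symbols : List String := [".", "/", "{", "}", "(", ")"]
    if !(necessarily_symbols.all (fun symbol => PySem.Str.isIn symbol pattern)) then false
    else if PySem.Str.find pattern "/" > PySem.Str.find pattern "." ∨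
            PySem.Str.find pattern "(" > PySem.Str.find pattern "{" ∨
            PySem.Str.find pattern "." > PySem.Str.find pattern "(" ∨
            PySem.Str.rfind pattern ")" ≠ PySem.Str.len pattern - 1 ∨
            PySem.Str.rfind pattern "}" ≠ PySem.Str.len pattern - 2 then false
    else if PySem.Str.isIn "|" pattern ∧
            PySem.Str.rfind pattern "|" > PySem.Str.rfind pattern "}" ∧
            PySem.Str.find pattern "|" < PySem.Str.find pattern "{" then false
    else if PySem.Str.isIn "[" pattern ∧
            PySem.Str.rfind pattern "]" > PySem.Str.len pattern - 3 then false
    else true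

-- ===== PORT B =====
-- the loop of Source B: 'expected' is the mutable list, early 'return False' is the
-- 'false' branch, falling off the loop returns 'not expected' (= isEmpty)
def vpLoop (s : List Char) (expected : List Char) : Bool :=
  match s, expected with
  | [], exp => exp.isEmpty
  | _ :: t, [] => vpLoop t []
  | ch :: t, e :: rest =>
    if ch = e then vpLoop t rest
    else if (e :: rest).contains ch then false
    else vpLoop t (e :: rest)

def validate_pattern_alt (pattern : String) : Bool :=
  if !(PySem.Str.endswith pattern "})") then false
  else vpLoop pattern.toList ['/', '.', '(', '{']

-- ===== PRECONDITION & SPEC =====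
def Spec_validate_pattern (pattern : String) (out : Bool) : Prop := out = validate_pattern_alt pattern
instance (pattern : String) (out : Bool) : Decidable (Spec_validate_pattern pattern out) := by unfold Spec_validate_pattern; infer_instance

-- ===== CLAIM (what is proved, stated in full; the proofs are below) =====
def Claim_equal_validate_pattern : Prop := ∀ (pattern : String), Dom_validate_pattern pattern → Spec_validate_pattern pattern (validate_pattern pattern)

-- ===== LEMMAS AND PROOFS =====

-- the common characterisation both ports are proved equivalent to
def Cspec (s : List Char) : Prop :=
  2 ≤ s.length ∧ s[s.length - 1]? = some ')' ∧ s[s.length - 2]? = some '}' ∧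
  (∀ c ∈ (['/', '.', '(', '{'] : List Char), c ∈ s) ∧
  (['/', '.', '(', '{'] : List Char).Pairwise
    (fun c d => (PySem.List.index? s c).getD 0 < (PySem.List.index? s d).getD 0)

-- ---- generic index helpers ----

theorem idx_cons_ne (t : List Char) (c d : Char) (h : c ≠ d) (hd : d ∈ t) :
    (PySem.List.index? (c :: t) d).getD 0 = (PySem.List.index? t d).getD 0 + 1 := by
  rw [PySem.List.index?_cons_of_ne _ h]
  cases hix : PySem.List.index? t d with
  | none => exact absurd ((PySem.List.index?_eq_none_iff t d).1 hix) (by simp [hd])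
  | some k => simp

theorem pairwise_shift (t : List Char) (c : Char) (l : List Char) (hc : c ∉ l)
    (hp : ∀ d ∈ l, d ∈ t) :
    (l.Pairwise fun a b => (PySem.List.index? (c :: t) a).getD 0 < (PySem.List.index? (c :: t) b).getD 0)
      ↔ (l.Pairwise fun a b => (PySem.List.index? t a).getD 0 < (PySem.List.index? t b).getD 0) := by
  apply List.Pairwise.iff_of_mem
  intro a b ha hb
  rw [idx_cons_ne t c a (fun h => hc (h ▸ ha)) (hp a ha),
    idx_cons_ne t c b (fun h => hc (h ▸ hb)) (hp b hb)]
  omega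

-- ---- the state machine of B: characterisation ----

theorem vpLoop_iff (s : List Char) : ∀ exp : List Char, exp.Nodup →
    (vpLoop s exp = true ↔
      ((∀ c ∈ exp, c ∈ s) ∧ exp.Pairwise
        (fun c d => (PySem.List.index? s c).getD 0 < (PySem.List.index? s d).getD 0))) := by
  induction s with
  | nil =>
    intro exp _
    cases exp with
    | nil => simp [vpLoop]
    | cons e rest =>
      have hfalse : vpLoop [] (e :: rest) = false := rfl
      rw [hfalse]
      constructor
      · intro h; exact absurd h (by simp)
      · rintro ⟨hpres, _⟩
        exact absurd (hpres e List.mem_cons_self) (by simp)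
  | cons c t ih =>
    intro exp hnd
    cases exp with
    | nil => simpa [vpLoop] using (ih [] (by simp))
    | cons e rest =>
      have hunfold : vpLoop (c :: t) (e :: rest) =
          (if c = e then vpLoop t rest
           else if (e :: rest).contains c then false else vpLoop t (e :: rest)) := rfl
      have hndr : rest.Nodup := hnd.of_cons
      have hner : e ∉ rest := (List.nodup_cons.1 hnd).1
      by_cases hce : c = e
      · subst hce
        have hstep : vpLoop (c :: t) (c :: rest) = vpLoop t rest := by
          rw [hunfold, if_pos rfl]
        rw [hstep, ih rest hndr]
        by_cases hp : ∀ d ∈ rest, d ∈ t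
        · constructor
          · rintro ⟨_, hpw⟩
            refine ⟨?_, ?_⟩
            · intro d hd
              rcases List.mem_cons.1 hd with rfl | hd'
              · exact List.mem_cons_self
              · exact List.mem_cons_of_mem c (hp d hd')
            · rw [List.pairwise_cons]
              refine ⟨?_, (pairwise_shift t c rest hner hp).2 hpw⟩
              intro d hd
              rw [PySem.List.index?_cons_self,
                idx_cons_ne t c d (fun h => hner (h ▸ hd)) (hp d hd)]
              simp
          · rintro ⟨_, hpw⟩
            rw [List.pairwise_cons] at hpw
            exact ⟨hp, (pairwise_shift t c rest hner hp).1 hpw.2⟩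
        · push_neg at hp
          obtain ⟨d, hd, hdt⟩ := hp
          constructor
          · rintro ⟨hpres, _⟩
            exact absurd (hpres d hd) hdt
          · rintro ⟨hpres, _⟩
            rcases List.mem_cons.1 (hpres d (List.mem_cons_of_mem _ hd)) with rfl | h
            · exact (hner hd).elim
            · exact (hdt h).elim
      · by_cases hcr : c ∈ rest
        · have hcont : ((e :: rest).contains c) = true := by
            simpa using List.mem_cons_of_mem e hcr
          have hstep : vpLoop (c :: t) (e :: rest) = false := by
            rw [hunfold, if_neg hce, if_pos hcont]
          rw [hstep]
          constructor
          · intro h; exact absurd h (by simp)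
          · rintro ⟨hpres, hpw⟩
            rw [List.pairwise_cons] at hpw
            have h1 := hpw.1 c hcr
            rw [PySem.List.index?_cons_self] at h1
            simp at h1
        · have hcont : ((e :: rest).contains c) = false := by
            rw [Bool.eq_false_iff]
            intro h
            have hmem : c ∈ e :: rest := by simpa using h
            rcases List.mem_cons.1 hmem with h' | h'
            · exact hce h'
            · exact hcr h'
          have hstep : vpLoop (c :: t) (e :: rest) = vpLoop t (e :: rest) := by
            rw [hunfold, if_neg hce, hcont, if_neg (by simp)]
          rw [hstep, ih (e :: rest) hnd]
          have hnc : c ∉ e :: rest := by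
            intro h
            rcases List.mem_cons.1 h with h' | h'
            · exact hce h'
            · exact hcr h'
          by_cases hp : ∀ d ∈ (e :: rest), d ∈ t
          · constructor
            · rintro ⟨_, hpw⟩
              refine ⟨?_, (pairwise_shift t c (e :: rest) hnc hp).2 hpw⟩
              intro d hd
              exact List.mem_cons_of_mem c (hp d hd)
            · rintro ⟨_, hpw⟩
              exact ⟨hp, (pairwise_shift t c (e :: rest) hnc hp).1 hpw⟩
          · push_neg at hp
            obtain ⟨d, hd, hdt⟩ := hp
            constructor
            · rintro ⟨hpres, _⟩
              exact absurd (hpres d hd) hdt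
            · rintro ⟨hpres, _⟩
              rcases List.mem_cons.1 (hpres d hd) with rfl | h
              · exact (hnc hd).elim
              · exact (hdt h).elim

-- ---- suffix characterisation for B's endswith ----

theorem suffix_two (s : List Char) :
    (['}', ')'] : List Char) <:+ s ↔
      2 ≤ s.length ∧ s[s.length - 1]? = some ')' ∧ s[s.length - 2]? = some '}' := by
  constructor
  · rintro ⟨t, rfl⟩
    have hlen : (t ++ ['}', ')']).length = t.length + 2 := by simp
    refine ⟨by omega, ?_, ?_⟩
    · rw [hlen, show t.length + 2 - 1 = t.length + 1 from by omega,
        List.getElem?_append_right (by omega)]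
      simp
    · rw [hlen, show t.length + 2 - 2 = t.length from by omega,
        List.getElem?_append_right (by omega)]
      simp
  · rintro ⟨h2, hlast, hpen⟩
    refine ⟨s.take (s.length - 2), ?_⟩
    have htl : (s.take (s.length - 2)).length = s.length - 2 := by
      rw [List.length_take]
      omega
    apply List.ext_getElem?
    intro i
    by_cases hi : i < s.length - 2
    · rw [List.getElem?_append_left (by omega)]
      rw [List.getElem?_take_of_lt hi]
    · by_cases hin : i < s.length
      · rw [List.getElem?_append_right (by omega)]
        rw [htl]
        by_cases hie : i = s.length - 2
        · rw [show i - (s.length - 2) = 0 from by omega]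
          rw [hie] at *
          exact hpen.symm
        · have : i = s.length - 1 := by omega
          rw [show i - (s.length - 2) = 1 from by omega]
          rw [this] at *
          exact hlast.symm
      · have hlhs : (s.take (s.length - 2) ++ ['}', ')'])[i]? = none :=
          List.getElem?_eq_none (by simp; omega)
        have hrhs : s[i]? = none := List.getElem?_eq_none (by omega)
        rw [hlhs, hrhs]

theorem Biff (p : String) : validate_pattern_alt p = true ↔ Cspec p.toList := by
  unfold validate_pattern_alt Cspec
  simp only [PySem.Str.endswith_eq, show ("})".toList = ['}', ')']) from rfl]
  by_cases he : PySem.Chars.endswith p.toList ['}', ')'] = true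
  · rw [he]
    simp only [Bool.not_true, Bool.false_eq_true, if_false]
    obtain ⟨h2, hlast, hpen⟩ := (suffix_two p.toList).1 ((PySem.Chars.endswith_iff _ _).1 he)
    rw [vpLoop_iff p.toList ['/', '.', '(', '{'] (by decide)]
    constructor
    · rintro ⟨x, y⟩; exact ⟨h2, hlast, hpen, x, y⟩
    · rintro ⟨_, _, _, x, y⟩; exact ⟨x, y⟩
  · rw [Bool.not_eq_true] at he
    rw [he]
    simp only [Bool.not_false, if_true]
    constructor
    · intro h; exact absurd h (by simp)
    · rintro ⟨h2, hlast, hpen, -, -⟩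
      exact absurd ((PySem.Chars.endswith_iff _ _).2 ((suffix_two p.toList).2 ⟨h2, hlast, hpen⟩)) (by simp [he])

-- ---- A-side machinery: last-occurrence index, find/rfind on single characters ----

def lastIdx? (s : List Char) (c : Char) : Option Nat :=
  match s with
  | [] => none
  | x :: xs =>
    match lastIdx? xs c with
    | some k => some (k + 1)
    | none => if x = c then some 0 else none

theorem lastIdx?_eq_none_iff (s : List Char) (c : Char) : lastIdx? s c = none ↔ c ∉ s := by
  induction s with
  | nil => simp [lastIdx?]
  | cons x xs ih =>
    simp only [lastIdx?]
    cases h : lastIdx? xs c with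
    | some k => simp [h] at ih ⊢; intro _; exact ih
    | none =>
      simp [h] at ih
      by_cases hx : x = c
      · simp [hx]
      · simp [hx, ih]; exact fun hh => hx hh.symm

theorem lastIdx?_eq_some_iff (s : List Char) (c : Char) (k : Nat) :
    lastIdx? s c = some k ↔ s[k]? = some c ∧ ∀ i, k < i → s[i]? ≠ some c := by
  induction s generalizing k with
  | nil => simp [lastIdx?]
  | cons x xs ih =>
    simp only [lastIdx?]
    cases h : lastIdx? xs c with
    | some m =>
      have hm := (ih m).1 h
      constructor
      · rintro hk
        simp only [Option.some_inj] at hk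
        subst hk
        refine ⟨by simpa using hm.1, ?_⟩
        intro i hi
        cases i with
        | zero => omega
        | succ j => simpa using hm.2 j (by omega)
      · rintro ⟨h1, h2⟩
        cases k with
        | zero =>
          exfalso
          have hlt : m < xs.length := by
            have := hm.1; exact (List.getElem?_eq_some_iff.1 this).1
          exact h2 (m+1) (by omega) (by simpa using hm.1)
        | succ j =>
          have : lastIdx? xs c = some j := by
            apply (ih j).2
            refine ⟨by simpa using h1, ?_⟩
            intro i hi
            have := h2 (i+1) (by omega)
            simpa using this
          rw [h] at this
          simp at this
          simp [this]
    | none =>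
      have hn : c ∉ xs := (lastIdx?_eq_none_iff xs c).1 h
      by_cases hx : x = c
      · subst hx
        simp only [reduceIte]
        constructor
        · rintro hk
          simp only [Option.some_inj] at hk
          subst hk
          refine ⟨by simp, ?_⟩
          intro i hi
          cases i with
          | zero => omega
          | succ j =>
            simp only [List.getElem?_cons_succ]
            intro hc
            exact hn (List.mem_of_getElem? hc)
        · rintro ⟨h1, h2⟩
          cases k with
          | zero => rfl
          | succ j =>
            exfalso
            exact hn (List.mem_of_getElem? (by simpa using h1))
      · simp only [if_neg hx]
        constructor
        · intro hk; cases hk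
        · rintro ⟨h1, h2⟩
          exfalso
          cases k with
          | zero => simp at h1; exact hx h1
          | succ j => exact hn (List.mem_of_getElem? (by simpa using h1))

theorem singleton_prefix_drop (s : List Char) (c : Char) (i : Nat) :
    [c] <+: s.drop i ↔ s[i]? = some c := by
  constructor
  · rintro ⟨u, hu⟩
    have : (s.drop i)[0]? = some c := by rw [← hu]; rfl
    simpa [List.getElem?_drop] using this
  · intro h
    have hlt : i < s.length := (List.getElem?_eq_some_iff.1 h).1
    refine ⟨s.drop (i+1), ?_⟩
    rw [List.drop_eq_getElem_cons hlt]
    simp_all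

theorem singleton_infix_iff_mem (s : List Char) (c : Char) : [c] <:+: s ↔ c ∈ s := by
  constructor
  · intro h; exact (List.singleton_sublist).1 h.sublist
  · intro h
    obtain ⟨l, r, rfl⟩ := List.append_of_mem h
    exact ⟨l, r, by simp⟩

theorem find_singleton (s : List Char) (c : Char) :
    PySem.Chars.find s [c] = ((PySem.List.index? s c).map (fun k => (k : Int))).getD (-1) := by
  cases h : PySem.List.index? s c with
  | none =>
    have : c ∉ s := (PySem.List.index?_eq_none_iff _ _).1 h
    have : ¬ [c] <:+: s := fun hin => this ((singleton_infix_iff_mem s c).1 hin)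
    simp [(PySem.Chars.find_eq_neg_one_iff s [c]).2 this]
  | some k =>
    obtain ⟨hk, hget, hmin⟩ := PySem.List.getElem_of_index?_eq_some h
    have hmem : c ∈ s := by rw [← hget]; exact List.getElem_mem hk
    have hnn : 0 ≤ PySem.Chars.find s [c] :=
      (PySem.Chars.find_nonneg_iff s [c]).2 ((singleton_infix_iff_mem s c).2 hmem)
    obtain ⟨hpre, hsmall⟩ := PySem.Chars.find_spec hnn
    have hfk : (PySem.Chars.find s [c]).toNat = k := by
      rcases Nat.lt_trichotomy (PySem.Chars.find s [c]).toNat k with hlt | heq | hgt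
      · exfalso
        have := (singleton_prefix_drop s c _).1 hpre
        have hlt2 : (PySem.Chars.find s [c]).toNat < s.length := by omega
        have : s[(PySem.Chars.find s [c]).toNat] = c := by
          simpa [List.getElem?_eq_getElem hlt2] using this
        exact hmin _ hlt this
      · exact heq
      · exact absurd ((singleton_prefix_drop s c k).2 (by rw [List.getElem?_eq_getElem hk, hget])) (hsmall k hgt)
    show PySem.Chars.find s [c] = (Option.map (fun k : Nat => (k : Int)) (some k)).getD (-1)
    simp only [Option.map_some, Option.getD_some]
    omega

theorem rfind_go_singleton (s : List Char) (c : Char) (j : Nat) :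
    PySem.Chars.rfind.go s [c] j =
      if ∃ i ≤ j, s[i]? = some c then
        ((Nat.findGreatest (fun i => s[i]? = some c) j : Nat) : Int)
      else -1 := by
  induction j with
  | zero =>
    show (if ([c]).isPrefixOf s = true then (0:Int) else -1) = _
    have hiff : ([c]).isPrefixOf s = true ↔ s[0]? = some c := by
      rw [List.isPrefixOf_iff_prefix]
      simpa using singleton_prefix_drop s c 0
    by_cases h : s[0]? = some c
    · simp [hiff.2 h, h, Nat.findGreatest]
    · have : ¬ ([c]).isPrefixOf s = true := fun hh => h (hiff.1 hh)
      simp [this, h]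
  | succ j ih =>
    show (if ([c]).isPrefixOf (s.drop (j+1)) = true then ((j:Int)+1) else PySem.Chars.rfind.go s [c] j) = _
    have hiff : ([c]).isPrefixOf (s.drop (j+1)) = true ↔ s[j+1]? = some c := by
      rw [List.isPrefixOf_iff_prefix]; exact singleton_prefix_drop s c (j+1)
    by_cases h : s[j+1]? = some c
    · rw [if_pos (hiff.2 h)]
      rw [if_pos ⟨j+1, le_refl _, h⟩]
      rw [Nat.findGreatest_succ, if_pos h]
      push_cast; ring
    · rw [if_neg (fun hh => h (hiff.1 hh)), ih]
      have hex : (∃ i ≤ j+1, s[i]? = some c) ↔ (∃ i ≤ j, s[i]? = some c) := by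
        constructor
        · rintro ⟨i, hi, hc⟩
          rcases Nat.lt_or_ge i (j+1) with h1 | h1
          · exact ⟨i, by omega, hc⟩
          · have heq : i = j+1 := by omega
            subst heq
            exact absurd hc h
        · rintro ⟨i, hi, hc⟩; exact ⟨i, by omega, hc⟩
      rw [Nat.findGreatest_succ, if_neg h]
      by_cases he : ∃ i ≤ j, s[i]? = some c
      · rw [if_pos he, if_pos (hex.2 he)]
      · rw [if_neg he, if_neg (fun hh => he (hex.1 hh))]

theorem rfind_singleton (s : List Char) (c : Char) :
    PySem.Chars.rfind s [c] = ((lastIdx? s c).map (fun k => (k : Int))).getD (-1) := by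
  show PySem.Chars.rfind.go s [c] s.length = _
  rw [rfind_go_singleton]
  cases h : lastIdx? s c with
  | none =>
    have hn : c ∉ s := (lastIdx?_eq_none_iff s c).1 h
    rw [if_neg]
    · simp
    · rintro ⟨i, _, hc⟩; exact hn (List.mem_of_getElem? hc)
  | some k =>
    obtain ⟨h1, h2⟩ := (lastIdx?_eq_some_iff s c k).1 h
    have hk : k < s.length := (List.getElem?_eq_some_iff.1 h1).1
    rw [if_pos ⟨k, by omega, h1⟩]
    have : Nat.findGreatest (fun i => s[i]? = some c) s.length = k := by
      rw [Nat.findGreatest_eq_iff]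
      exact ⟨by omega, fun _ => h1, fun m hm hmle => h2 m hm⟩
    rw [this]
    simp

theorem mem_of_isIn (s : List Char) (c : Char) (h : PySem.Chars.isIn [c] s = true) : c ∈ s :=
  (singleton_infix_iff_mem s c).1 ((PySem.Chars.isIn_iff_infix [c] s).1 h)

theorem isIn_of_mem (s : List Char) (c : Char) (h : c ∈ s) : PySem.Chars.isIn [c] s = true :=
  (PySem.Chars.isIn_iff_infix [c] s).2 ((singleton_infix_iff_mem s c).2 h)

theorem find_idx (s : List Char) (c : Char) (h : c ∈ s) :
    PySem.Chars.find s [c] = ((PySem.List.index? s c).getD 0 : Int) := by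
  rw [find_singleton]
  cases hix : PySem.List.index? s c with
  | none => exact absurd ((PySem.List.index?_eq_none_iff s c).1 hix) (by simp [h])
  | some k => simp

theorem idx_spec (s : List Char) (c : Char) (h : c ∈ s) :
    ∃ k, (PySem.List.index? s c).getD 0 = k ∧ s[k]? = some c := by
  cases hix : PySem.List.index? s c with
  | none => exact absurd ((PySem.List.index?_eq_none_iff s c).1 hix) (by simp [h])
  | some k =>
    obtain ⟨hk, hget, _⟩ := PySem.List.getElem_of_index?_eq_some hix
    exact ⟨k, by simp, by rw [List.getElem?_eq_getElem hk, hget]⟩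

theorem idx_ne (s : List Char) (c d : Char) (hc : c ∈ s) (hd : d ∈ s) (hne : c ≠ d) :
    (PySem.List.index? s c).getD 0 ≠ (PySem.List.index? s d).getD 0 := by
  obtain ⟨k, hk, hks⟩ := idx_spec s c hc
  obtain ⟨l, hl, hls⟩ := idx_spec s d hd
  rw [hk, hl]
  intro heq
  subst heq
  rw [hks] at hls
  exact hne (Option.some_inj.1 hls)

theorem rfind_eq_of (s : List Char) (c : Char) (k : Nat) (h1 : s[k]? = some c)
    (h2 : ∀ i, k < i → s[i]? ≠ some c) : PySem.Chars.rfind s [c] = (k : Int) := by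
  rw [rfind_singleton, (lastIdx?_eq_some_iff s c k).2 ⟨h1, h2⟩]
  simp

theorem rfind_mem_spec (s : List Char) (c : Char) (h : c ∈ s) :
    ∃ k : Nat, PySem.Chars.rfind s [c] = (k : Int) ∧ k < s.length ∧ s[k]? = some c := by
  cases hix : lastIdx? s c with
  | none => exact absurd ((lastIdx?_eq_none_iff s c).1 hix) (by simp [h])
  | some k =>
    obtain ⟨h1, _⟩ := (lastIdx?_eq_some_iff s c k).1 hix
    exact ⟨k, by rw [rfind_singleton, hix]; simp, (List.getElem?_eq_some_iff.1 h1).1, h1⟩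

theorem Aiff (p : String) : validate_pattern p = true ↔ Cspec p.toList := by
  unfold validate_pattern
  simp only [PySem.Str.find_eq, PySem.Str.rfind_eq, PySem.Str.isIn_eq, PySem.Str.len_eq,
    List.all_cons, List.all_nil, Bool.and_true,
    show (".".toList = ['.']) from rfl, show ("/".toList = ['/']) from rfl,
    show ("{".toList = ['{']) from rfl, show ("}".toList = ['}']) from rfl,
    show ("(".toList = ['(']) from rfl, show (")".toList = [')']) from rfl,
    show ("|".toList = ['|']) from rfl, show ("[".toList = ['[']) from rfl,
    show ("]".toList = [']']) from rfl]
  set s := p.toList with hs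
  split_ifs with hlen hall hord hbar hbrk
  · -- len = 0 : False ↔ Cspec
    simp only [Bool.false_eq_true, false_iff]
    rintro ⟨h2, -, -, -, -⟩
    omega
  · -- some required symbol missing
    simp only [Bool.false_eq_true, false_iff]
    rintro ⟨h2, hlast, hpen, hpres, -⟩
    have m1 : ('.' : Char) ∈ s := hpres '.' (by simp)
    have m2 : ('/' : Char) ∈ s := hpres '/' (by simp)
    have m3 : ('(' : Char) ∈ s := hpres '(' (by simp)
    have m4 : ('{' : Char) ∈ s := hpres '{' (by simp)
    have m5 : (')' : Char) ∈ s := List.mem_of_getElem? hlast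
    have m6 : ('}' : Char) ∈ s := List.mem_of_getElem? hpen
    simp [isIn_of_mem _ _ m1, isIn_of_mem _ _ m2, isIn_of_mem _ _ m3,
      isIn_of_mem _ _ m4, isIn_of_mem _ _ m5, isIn_of_mem _ _ m6] at hall
  · -- ordering / position test fails
    simp only [Bool.false_eq_true, false_iff]
    rintro ⟨h2, hlast, hpen, hpres, hpw⟩
    have m1 : ('.' : Char) ∈ s := hpres '.' (by simp)
    have m2 : ('/' : Char) ∈ s := hpres '/' (by simp)
    have m3 : ('(' : Char) ∈ s := hpres '(' (by simp)
    have m4 : ('{' : Char) ∈ s := hpres '{' (by simp)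
    simp only [List.pairwise_cons, List.mem_cons, List.not_mem_nil] at hpw
    obtain ⟨hA, hB, hC, -⟩ := hpw
    have o1 := hA '.' (by simp)
    have o2 := hA '(' (by simp)
    have o3 := hA '{' (by simp)
    have o4 := hB '(' (by simp)
    have o5 := hB '{' (by simp)
    have o6 := hC '{' (by simp)
    rcases hord with h | h | h | h | h
    · rw [find_idx s '/' m2, find_idx s '.' m1] at h
      omega
    · rw [find_idx s '(' m3, find_idx s '{' m4] at h
      omega
    · rw [find_idx s '.' m1, find_idx s '(' m3] at h
      omega
    · apply h
      rw [rfind_eq_of s ')' (s.length - 1) hlast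
        (fun i hi => by rw [List.getElem?_eq_none (by omega)]; simp)]
      omega
    · apply h
      rw [rfind_eq_of s '}' (s.length - 2) hpen ?_]
      · omega
      · intro i hi
        by_cases hie : i = s.length - 1
        · rw [hie, hlast]
          simp
        · rw [List.getElem?_eq_none (by omega)]
          simp
  · -- the '|' branch: vacuous under Cspec
    simp only [Bool.false_eq_true, false_iff]
    rintro ⟨h2, hlast, hpen, -, -⟩
    obtain ⟨hin, hgt, -⟩ := hbar
    obtain ⟨k, hk, hklt, hks⟩ := rfind_mem_spec s '|' (mem_of_isIn s '|' hin)
    rw [hk, rfind_eq_of s '}' (s.length - 2) hpen ?_] at hgt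
    · have hkn : k = s.length - 1 := by omega
      rw [hkn, hlast] at hks
      exact absurd (Option.some_inj.1 hks) (by decide)
    · intro i hi
      by_cases hie : i = s.length - 1
      · rw [hie, hlast]; simp
      · rw [List.getElem?_eq_none (by omega)]; simp
  · -- the '[' branch: vacuous under Cspec
    simp only [Bool.false_eq_true, false_iff]
    rintro ⟨h2, hlast, hpen, -, -⟩
    obtain ⟨hin, hgt⟩ := hbrk
    rw [rfind_singleton] at hgt
    cases hix : lastIdx? s ']' with
    | none =>
      rw [hix] at hgt
      simp at hgt
      omega
    | some k =>
      obtain ⟨h1, -⟩ := (lastIdx?_eq_some_iff s ']' k).1 hix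
      have hklt : k < s.length := (List.getElem?_eq_some_iff.1 h1).1
      rw [hix] at hgt
      simp at hgt
      have hk1 : k ≠ s.length - 1 := by
        intro hh
        rw [hh, hlast] at h1
        exact absurd (Option.some_inj.1 h1) (by decide)
      have hk2 : k ≠ s.length - 2 := by
        intro hh
        rw [hh, hpen] at h1
        exact absurd (Option.some_inj.1 h1) (by decide)
      omega
  · -- all checks pass: Cspec holds
    simp only [true_iff]
    push_neg at hord
    obtain ⟨o1, o2, o3, o4, o5⟩ := hord
    have hX : (PySem.Chars.isIn ['.'] s && (PySem.Chars.isIn ['/'] s && (PySem.Chars.isIn ['{'] s &&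
        (PySem.Chars.isIn ['}'] s && (PySem.Chars.isIn ['('] s && PySem.Chars.isIn [')'] s))))) = true := by
      rcases Bool.eq_false_or_eq_true (PySem.Chars.isIn ['.'] s && (PySem.Chars.isIn ['/'] s &&
          (PySem.Chars.isIn ['{'] s && (PySem.Chars.isIn ['}'] s &&
            (PySem.Chars.isIn ['('] s && PySem.Chars.isIn [')'] s))))) with hX | hX
      · exact hX
      · exact absurd (by rw [hX]; rfl) hall
    simp only [Bool.and_eq_true] at hX
    obtain ⟨i1, i2, i3, i4, i5, i6⟩ := hX
    have m1 : ('.' : Char) ∈ s := mem_of_isIn s '.' i1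
    have m2 : ('/' : Char) ∈ s := mem_of_isIn s '/' i2
    have m3 : ('{' : Char) ∈ s := mem_of_isIn s '{' i3
    have m4 : ('}' : Char) ∈ s := mem_of_isIn s '}' i4
    have m5 : ('(' : Char) ∈ s := mem_of_isIn s '(' i5
    have m6 : (')' : Char) ∈ s := mem_of_isIn s ')' i6
    -- positions of the two rfinds
    obtain ⟨k, hk, hklt, hks⟩ := rfind_mem_spec s ')' m6
    obtain ⟨l, hl, hllt, hls⟩ := rfind_mem_spec s '}' m4
    rw [hk] at o4
    rw [hl] at o5
    have h2 : 2 ≤ s.length := by omega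
    have hkn : k = s.length - 1 := by omega
    have hln : l = s.length - 2 := by omega
    refine ⟨h2, by rw [← hkn]; exact hks, by rw [← hln]; exact hls, ?_, ?_⟩
    · intro c hc
      simp only [List.mem_cons, List.not_mem_nil, or_false] at hc
      rcases hc with rfl | rfl | rfl | rfl
      · exact m2
      · exact m1
      · exact m5
      · exact m3
    · rw [find_idx s '/' m2, find_idx s '.' m1] at o1
      rw [find_idx s '(' m5, find_idx s '{' m3] at o2
      rw [find_idx s '.' m1, find_idx s '(' m5] at o3
      have n1 := idx_ne s '/' '.' m2 m1 (by decide)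
      have n2 := idx_ne s '.' '(' m1 m5 (by decide)
      have n3 := idx_ne s '(' '{' m5 m3 (by decide)
      simp only [List.pairwise_cons, List.mem_cons, List.not_mem_nil, or_false, List.Pairwise.nil]
      refine ⟨?_, ?_, ?_, fun a h => h.elim, trivial⟩
      · intro d hd
        rcases hd with rfl | rfl | rfl
        · omega
        · omega
        · omega
      · intro d hd
        rcases hd with rfl | rfl
        · omega
        · omega
      · intro d hd
        rcases hd with rfl
        omega

-- ===== VERDICT (by name: the statement is the Claim_ definition above) =====
theorem validate_pattern_spec : Claim_equal_validate_pattern := by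
  intro pattern _
  unfold Spec_validate_pattern
  exact Bool.eq_iff_iff.mpr ((Aiff pattern).trans (Biff pattern).symm)
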